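-- pv_equiv track=rewrite | github.com/SeongJun-Ham/PS | class3/1780_S2.py | divideNineAreas
-- ===== SOURCE A (Python) =====
-- def divideNineAreas(inputList):
--     N = len(inputList)
--     outputList = []
--     for i in range(3):
--         for j in range(3):
--             storage = []
--             for k in range(int(N/3)):
--                 storage.append(inputList[int(N/3)*i+k][int(N/3)*j:int(N/3)*(j+1)])
--             outputList.append(storage)
--     return outputList
-- ===== SOURCE B (Python) =====
-- def divideNineAreas(inputList):
--     m = len(inputList) // 3
--     out = [[] for _ in range(9)]
--     for r in range(3 * m):
--         b = 3 * (r // m)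
--         row = inputList[r]
--         out[b].append(row[0:m])
--         out[b + 1].append(row[m:2 * m])
--         out[b + 2].append(row[2 * m:3 * m])
--     return out
-- ===== Notes on version B (the rewrite author's own statement) =====
-- stated objective: alternative
-- what changed: Instead of A's triple nested loops gathering each of the 9 blocks in turn (re-scanning rows block by block), B pre-creates 9 empty buckets and makes a single pass over the rows, computing each row's block-row r//m once and distributing its three column slices into the corresponding three buckets.
import Mathlib
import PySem

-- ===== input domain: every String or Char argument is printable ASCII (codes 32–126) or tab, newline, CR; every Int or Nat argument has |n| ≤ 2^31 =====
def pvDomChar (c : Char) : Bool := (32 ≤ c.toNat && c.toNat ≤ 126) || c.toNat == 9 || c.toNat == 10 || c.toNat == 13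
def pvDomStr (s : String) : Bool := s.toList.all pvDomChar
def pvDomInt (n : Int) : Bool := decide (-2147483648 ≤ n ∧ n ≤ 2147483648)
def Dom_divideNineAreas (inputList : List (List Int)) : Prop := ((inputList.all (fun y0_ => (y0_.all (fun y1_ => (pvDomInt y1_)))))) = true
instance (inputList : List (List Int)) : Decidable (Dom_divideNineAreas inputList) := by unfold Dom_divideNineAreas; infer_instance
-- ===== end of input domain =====

-- B makes a single pass over the rows, distributing each row's three column
-- slices into 9 pre-created buckets, instead of A's triple nested block-gathering
-- loops; same asymptotic cost (objective: alternative decomposition).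

-- ===== PORT A =====
-- literal transliteration of A: outer loops i, j over range(3), inner loop k over
-- range(int(N/3)); int(N/3) is truncating division (PySem.Int.truncdiv).
-- inputList[...] is ported as pyGet? ... |>.getD [] : the index int(N/3)*i+k is
-- always < N, so the default is never hit (it only makes the port total).
def divideNineAreas (inputList : List (List Int)) : List (List (List Int)) :=
  let N : Int := inputList.length
  (PySem.List.pyRange 0 3 1).foldl (fun outputList i =>
    (PySem.List.pyRange 0 3 1).foldl (fun outputList j =>
      outputList ++
        [(PySem.List.pyRange 0 (PySem.Int.truncdiv N 3) 1).foldl (fun storage k =>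
            storage ++
              [PySem.List.slice
                ((PySem.List.pyGet? inputList (PySem.Int.truncdiv N 3 * i + k)).getD [])
                (some (PySem.Int.truncdiv N 3 * j))
                (some (PySem.Int.truncdiv N 3 * (j + 1)))]) []]) outputList) []

-- ===== PORT B =====
-- one loop body of Source B: append row[0:m], row[m:2*m], row[2*m:3*m] to the three
-- buckets of the row's block-row (b = 3*(r//m)); list index assignment is
-- List.modify (index always < 9, as r < 3*m).
def pvStepB (inputList : List (List Int)) (m : Int)
    (out : List (List (List Int))) (r : Int) : List (List (List Int)) :=
  let b : Nat := (3 * PySem.Int.floordiv r m).toNat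
  let row : List Int := (PySem.List.pyGet? inputList r).getD []
  let out1 := out.modify b (· ++ [PySem.List.slice row (some 0) (some m)])
  let out2 := out1.modify (b + 1) (· ++ [PySem.List.slice row (some m) (some (2 * m))])
  out2.modify (b + 2) (· ++ [PySem.List.slice row (some (2 * m)) (some (3 * m))])

def divideNineAreas_alt (inputList : List (List Int)) : List (List (List Int)) :=
  let m : Int := PySem.Int.floordiv (inputList.length : Int) 3
  (PySem.List.pyRange 0 (3 * m) 1).foldl (pvStepB inputList m) (List.replicate 9 [])

-- ===== PRECONDITION & SPEC =====
def Spec_divideNineAreas (inputList : List (List Int)) (out : List (List (List Int))) : Prop := out = divideNineAreas_alt inputList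
instance (inputList : List (List Int)) (out : List (List (List Int))) : Decidable (Spec_divideNineAreas inputList out) := by unfold Spec_divideNineAreas; infer_instance

-- ===== CLAIM (what is proved, stated in full; the proofs are below) =====
def Claim_equal_divideNineAreas : Prop := ∀ (inputList : List (List Int)), Dom_divideNineAreas inputList → Spec_divideNineAreas inputList (divideNineAreas inputList)

-- ===== LEMMAS AND PROOFS =====

-- the row r of the input, as both ports read it
def pvRow (L : List (List Int)) (r : Int) : List Int := (PySem.List.pyGet? L r).getD []

-- the three column slices B appends, as functions of the row index
def pvC0 (L : List (List Int)) (m : Int) (r : Int) : List Int :=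
  PySem.List.slice (pvRow L r) (some 0) (some m)
def pvC1 (L : List (List Int)) (m : Int) (r : Int) : List Int :=
  PySem.List.slice (pvRow L r) (some m) (some (2 * m))
def pvC2 (L : List (List Int)) (m : Int) (r : Int) : List Int :=
  PySem.List.slice (pvRow L r) (some (2 * m)) (some (3 * m))

-- literal-list reductions of B's three bucket updates (one per block-row)
lemma pvChain0 {α : Type} (e0 e1 e2 e3 e4 e5 e6 e7 e8 : α) (f g h : α → α) :
    (([e0, e1, e2, e3, e4, e5, e6, e7, e8].modify 0 f).modify 1 g).modify 2 h
      = [f e0, g e1, h e2, e3, e4, e5, e6, e7, e8] := rfl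
lemma pvChain3 {α : Type} (e0 e1 e2 e3 e4 e5 e6 e7 e8 : α) (f g h : α → α) :
    (([e0, e1, e2, e3, e4, e5, e6, e7, e8].modify 3 f).modify 4 g).modify 5 h
      = [e0, e1, e2, f e3, g e4, h e5, e6, e7, e8] := rfl
lemma pvChain6 {α : Type} (e0 e1 e2 e3 e4 e5 e6 e7 e8 : α) (f g h : α → α) :
    (([e0, e1, e2, e3, e4, e5, e6, e7, e8].modify 6 f).modify 7 g).modify 8 h
      = [e0, e1, e2, e3, e4, e5, f e6, g e7, h e8] := rfl

-- B's loop over one block-row segment [a, b) (all of whose rows have r // m = bi):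
-- it appends the three column slices of those rows to buckets 3bi, 3bi+1, 3bi+2.
lemma pvSeg (L : List (List Int)) (m : Int) (hm : 0 < m) (bi : Nat) (hbi : bi < 3) :
    ∀ (n : Nat) (a b : Int) (e0 e1 e2 e3 e4 e5 e6 e7 e8 : List (List Int)),
      (b - a).toNat = n → m * bi ≤ a → b ≤ m * (bi + 1) →
      (PySem.List.pyRange a b 1).foldl (pvStepB L m) [e0, e1, e2, e3, e4, e5, e6, e7, e8]
        = (([e0, e1, e2, e3, e4, e5, e6, e7, e8].modify (3 * bi)
              (· ++ (PySem.List.pyRange a b 1).map (pvC0 L m))).modify (3 * bi + 1)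
              (· ++ (PySem.List.pyRange a b 1).map (pvC1 L m))).modify (3 * bi + 2)
              (· ++ (PySem.List.pyRange a b 1).map (pvC2 L m)) := by
  intro n
  induction n with
  | zero =>
    intro a b e0 e1 e2 e3 e4 e5 e6 e7 e8 hn _ _
    rw [PySem.List.pyRange_one_eq_nil (by omega)]
    rcases bi with _ | _ | _ | bi
    · simp [List.modify]
    · simp [List.modify]
    · simp [List.modify]
    · omega
  | succ n ih =>
    intro a b e0 e1 e2 e3 e4 e5 e6 e7 e8 hn ha hb
    have hab : a < b := by omega
    rw [PySem.List.pyRange_one_cons hab]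
    have hfd : PySem.Int.floordiv a m = (bi : Int) := by
      rw [PySem.Int.floordiv_eq_iff_of_pos hm]
      constructor
      · calc ((bi : Int)) * m = m * bi := by ring
          _ ≤ a := ha
      · calc a < b := hab
          _ ≤ m * (bi + 1) := hb
          _ = ((bi : Int) + 1) * m := by ring
    simp only [List.foldl_cons, List.map_cons]
    have hstep : pvStepB L m [e0, e1, e2, e3, e4, e5, e6, e7, e8] a
        = (([e0, e1, e2, e3, e4, e5, e6, e7, e8].modify (3 * bi)
            (· ++ [pvC0 L m a])).modify (3 * bi + 1)
            (· ++ [pvC1 L m a])).modify (3 * bi + 2) (· ++ [pvC2 L m a]) := by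
      simp only [pvStepB, hfd]
      rcases bi with _ | _ | _ | bi
      · simp [List.modify, pvC0, pvC1, pvC2, pvRow]
      · simp [List.modify, pvC0, pvC1, pvC2, pvRow]
      · simp [List.modify, pvC0, pvC1, pvC2, pvRow]
      · omega
    rw [hstep]
    rcases bi with _ | _ | _ | bi
    · simp only [Nat.reduceMul, Nat.reduceAdd, pvChain0]
      rw [ih (a + 1) b _ _ _ _ _ _ _ _ _ (by omega) (by push_cast at ha ⊢; omega)
          (by push_cast at hb ⊢; omega)]
      simp only [Nat.reduceMul, Nat.reduceAdd, pvChain0]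
      simp
    · simp only [Nat.reduceMul, Nat.reduceAdd, pvChain3]
      rw [ih (a + 1) b _ _ _ _ _ _ _ _ _ (by omega) (by push_cast at ha ⊢; omega)
          (by push_cast at hb ⊢; omega)]
      simp only [Nat.reduceMul, Nat.reduceAdd, pvChain3]
      simp
    · simp only [Nat.reduceMul, Nat.reduceAdd, pvChain6]
      rw [ih (a + 1) b _ _ _ _ _ _ _ _ _ (by omega) (by push_cast at ha ⊢; omega)
          (by push_cast at hb ⊢; omega)]
      simp only [Nat.reduceMul, Nat.reduceAdd, pvChain6]
      simp
    · omega

-- reindexing a map over a shifted range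
lemma pvMapShift {α : Type} (f : Int → α) (c m : Int) :
    (PySem.List.pyRange c (c + m) 1).map f
      = (PySem.List.pyRange 0 m 1).map (fun k => f (c + k)) := by
  rw [PySem.List.pyRange_one, PySem.List.pyRange_one, List.map_map, List.map_map]
  have h : (c + m - c).toNat = (m - 0).toNat := by omega
  rw [h]
  apply List.map_congr_left
  intro k _
  simp [Function.comp]

-- int(N/3) on a nonnegative N is N // 3
lemma pvTrunc (n : Nat) : PySem.Int.truncdiv (n : Int) 3 = PySem.Int.floordiv (n : Int) 3 := by
  simp [PySem.Int.truncdiv, PySem.Int.floordiv]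
  rw [Int.fdiv_eq_ediv_of_nonneg _ (by positivity)]

lemma pvRange3 : PySem.List.pyRange 0 3 1 = [0, 1, 2] := by decide

-- ===== VERDICT (by name: the statement is the Claim_ definition above) =====
theorem divideNineAreas_spec : Claim_equal_divideNineAreas := by
  intro L _
  show divideNineAreas L = divideNineAreas_alt L
  have hT := pvTrunc L.length
  set m : Int := PySem.Int.floordiv (L.length : Int) 3 with hmdef
  have hm0 : 0 ≤ m := by
    rw [hmdef, PySem.Int.floordiv_eq_ediv_of_pos (by norm_num)]
    exact Int.ediv_nonneg (by positivity) (by norm_num)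
  -- A as nine explicit blocks
  have hA : divideNineAreas L
      = [(PySem.List.pyRange 0 m 1).map (fun k => pvC0 L m (m * 0 + k)),
         (PySem.List.pyRange 0 m 1).map (fun k => pvC1 L m (m * 0 + k)),
         (PySem.List.pyRange 0 m 1).map (fun k => pvC2 L m (m * 0 + k)),
         (PySem.List.pyRange 0 m 1).map (fun k => pvC0 L m (m * 1 + k)),
         (PySem.List.pyRange 0 m 1).map (fun k => pvC1 L m (m * 1 + k)),
         (PySem.List.pyRange 0 m 1).map (fun k => pvC2 L m (m * 1 + k)),
         (PySem.List.pyRange 0 m 1).map (fun k => pvC0 L m (m * 2 + k)),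
         (PySem.List.pyRange 0 m 1).map (fun k => pvC1 L m (m * 2 + k)),
         (PySem.List.pyRange 0 m 1).map (fun k => pvC2 L m (m * 2 + k))] := by
    unfold divideNineAreas
    rw [pvRange3]
    simp only [List.foldl_cons, List.foldl_nil, hT,
      PySem.List.foldl_append_singleton_eq_map, List.nil_append]
    norm_num [pvC0, pvC1, pvC2, pvRow]
    refine ⟨?_, ?_, ?_, ?_, ?_, ?_⟩ <;>
      · intro a _ _
        ring_nf
  rcases eq_or_lt_of_le hm0 with hm | hm
  · -- m = 0 : both sides are nine empty blocks
    rw [hA, divideNineAreas_alt, ← hmdef, ← hm]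
    norm_num [PySem.List.pyRange_one_eq_nil, List.replicate]
  · -- m > 0 : split B's row loop into the three block-row segments
    rw [hA, divideNineAreas_alt, ← hmdef]
    rw [PySem.List.pyRange_one_append 0 m (3 * m) (by omega) (by omega),
        PySem.List.pyRange_one_append m (2 * m) (3 * m) (by omega) (by omega),
        List.foldl_append, List.foldl_append]
    rw [show (List.replicate 9 ([] : List (List Int))) = [[], [], [], [], [], [], [], [], []] from rfl]
    rw [pvSeg L m hm 0 (by norm_num) (m - 0).toNat 0 m _ _ _ _ _ _ _ _ _ rfl
          (by push_cast; omega) (by push_cast; omega)]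
    simp only [Nat.reduceMul, Nat.reduceAdd, pvChain0]
    rw [pvSeg L m hm 1 (by norm_num) (2 * m - m).toNat m (2 * m) _ _ _ _ _ _ _ _ _ rfl
          (by push_cast; omega) (by push_cast; omega)]
    simp only [Nat.reduceMul, Nat.reduceAdd, pvChain3]
    rw [pvSeg L m hm 2 (by norm_num) (3 * m - 2 * m).toNat (2 * m) (3 * m) _ _ _ _ _ _ _ _ _ rfl
          (by push_cast; omega) (by push_cast; omega)]
    simp only [Nat.reduceMul, Nat.reduceAdd, pvChain6]
    have h1 : (2 : Int) * m = m + m := by ring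
    have h2 : (3 : Int) * m = 2 * m + m := by ring
    rw [h2, h1, pvMapShift (pvC0 L m) m m, pvMapShift (pvC1 L m) m m,
        pvMapShift (pvC2 L m) m m, ← h1, pvMapShift (pvC0 L m) (2 * m) m,
        pvMapShift (pvC1 L m) (2 * m) m, pvMapShift (pvC2 L m) (2 * m) m]
    simp only [List.nil_append]
    refine congrArg₂ _ ?_ (congrArg₂ _ ?_ (congrArg₂ _ ?_ (congrArg₂ _ ?_
      (congrArg₂ _ ?_ (congrArg₂ _ ?_ (congrArg₂ _ ?_ (congrArg₂ _ ?_
      (congrArg₂ _ ?_ rfl)))))))) <;>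
    · apply List.map_congr_left
      intro k _
      ring_nf
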